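-- pv_equiv track=rewrite | github.com/esbudylin/velimir | src/classifier.py | _mask_to_string
-- ===== SOURCE A (Python) =====
-- def _mask_to_string(mask: list[bool], caesura: list[int]):
--     caesura_mark = "|"
--     acccent_mark = "*"
--
--     def ms(mask):
--         res = ""
--         accentless_syllables = 0
--
--         for i, has_accent in enumerate(mask):
--             if has_accent:
--                 res += str(accentless_syllables)
--                 accentless_syllables = 0
--
--                 res += acccent_mark
--             else:
--                 accentless_syllables += 1
--
--         res += str(accentless_syllables)
--
--         return res
--
--     match caesura:
--         case []:
--             return ms(mask)
--         case [ca]: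
--             return caesura_mark.join(map(ms, (mask[:ca], mask[ca:])))
--         case [ca, cb]:
--             return caesura_mark.join(map(ms, (mask[:ca], mask[ca:cb], mask[cb:])))
--         case _:
--             raise ValueError("Invalid caesura sequence length")
-- ===== SOURCE B (Python) =====
-- def _mask_to_string(mask: list[bool], caesura: list[int]):
--     if len(caesura) > 2:
--         raise ValueError("Invalid caesura sequence length")
--
--     def ms(seg):
--         pos = [i for i, x in enumerate(seg) if x]
--         starts = [0] + [p + 1 for p in pos]
--         ends = pos + [len(seg)]
--         return "*".join(str(e - s) for s, e in zip(starts, ends))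
--
--     bounds = [0] + list(caesura) + [len(mask)]
--     return "|".join(ms(mask[a:b]) for a, b in zip(bounds, bounds[1:]))
-- ===== Notes on version B (the rewrite author's own statement) =====
-- stated objective: alternative
-- what changed: The inner helper now computes accent positions once and derives segment lengths as differences of consecutive boundaries (instead of a running counter with string concatenation), and the caesura match/case is replaced by a generic [0]+caesura+[len] boundaries list zipped into consecutive slices.
import Mathlib
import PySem

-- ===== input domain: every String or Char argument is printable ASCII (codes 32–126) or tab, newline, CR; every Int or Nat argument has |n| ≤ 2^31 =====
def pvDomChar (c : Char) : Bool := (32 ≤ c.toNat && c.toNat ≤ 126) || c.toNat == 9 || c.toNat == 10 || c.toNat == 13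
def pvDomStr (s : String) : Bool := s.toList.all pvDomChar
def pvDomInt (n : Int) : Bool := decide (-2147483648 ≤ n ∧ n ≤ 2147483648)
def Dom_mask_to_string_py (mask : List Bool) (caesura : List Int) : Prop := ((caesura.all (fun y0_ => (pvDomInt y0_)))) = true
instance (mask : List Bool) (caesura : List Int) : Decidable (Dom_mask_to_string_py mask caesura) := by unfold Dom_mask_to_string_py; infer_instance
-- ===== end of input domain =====

-- B re-implements the inner helper by accent-position/difference arithmetic and the
-- caesura dispatch by a generic boundaries-and-slices loop (objective: alternative,
-- not faster); return-value equivalence is proved on caesura lists of length ≤ 2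
-- (A raises ValueError otherwise).

-- ===== PORT A =====
-- inner helper `ms`: the counter-and-concatenate loop, state = (res, accentless_syllables)
def pvStepA (p : List Char × Int) (has_accent : Bool) : List Char × Int :=
  if has_accent then (p.1 ++ PySem.Int.toChars p.2 ++ ['*'], 0) else (p.1, p.2 + 1)

def pvMsA (mask : List Bool) : List Char :=
  let st := mask.foldl pvStepA ([], 0)
  st.1 ++ PySem.Int.toChars st.2

def mask_to_string_py (mask : List Bool) (caesura : List Int) : String :=
  match caesura with
  | [] => String.ofList (pvMsA mask)
  | [ca] => String.ofList (PySem.Chars.join ['|']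
      [pvMsA (PySem.List.slice mask none (some ca)),
       pvMsA (PySem.List.slice mask (some ca) none)])
  | [ca, cb] => String.ofList (PySem.Chars.join ['|']
      [pvMsA (PySem.List.slice mask none (some ca)),
       pvMsA (PySem.List.slice mask (some ca) (some cb)),
       pvMsA (PySem.List.slice mask (some cb) none)])
  | _ => ""   -- Python raises ValueError here; excluded by Pre_

-- ===== PORT B =====
-- inner helper `ms`: accent positions, then segment lengths as differences of boundaries
def pvMsB (seg : List Bool) : List Char :=
  let pos : List Int := ((PySem.List.enumerate seg 0).filter (fun p => p.2)).map (fun p => p.1)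
  let starts : List Int := 0 :: pos.map (fun p => p + 1)
  let ends : List Int := pos ++ [(seg.length : Int)]
  PySem.Chars.join ['*'] ((starts.zip ends).map (fun p => PySem.Int.toChars (p.2 - p.1)))

def mask_to_string_py_alt (mask : List Bool) (caesura : List Int) : String :=
  if caesura.length > 2 then ""   -- Python raises ValueError here; excluded by Pre_
  else
    let bounds : List Int := 0 :: (caesura ++ [(mask.length : Int)])
    String.ofList (PySem.Chars.join ['|']
      ((bounds.zip bounds.tail).map (fun p => pvMsB (PySem.List.slice mask (some p.1) (some p.2)))))

-- ===== PRECONDITION & SPEC =====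
-- Pre_ excludes caesura lists longer than 2, on which the Python A raises ValueError.
def Pre_mask_to_string_py (mask : List Bool) (caesura : List Int) : Prop := caesura.length ≤ 2
instance (mask : List Bool) (caesura : List Int) : Decidable (Pre_mask_to_string_py mask caesura) := by unfold Pre_mask_to_string_py; infer_instance
def pvWitness_mask_to_string_py : List Bool × List Int := ([true, false, false, true], [1])

def Spec_mask_to_string_py (mask : List Bool) (caesura : List Int) (out : String) : Prop := out = mask_to_string_py_alt mask caesura
instance (mask : List Bool) (caesura : List Int) (out : String) : Decidable (Spec_mask_to_string_py mask caesura out) := by unfold Spec_mask_to_string_py; infer_instance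

-- ===== CLAIM (what is proved, stated in full; the proofs are below) =====
def Claim_equal_mask_to_string_py : Prop := ∀ (mask : List Bool) (caesura : List Int), Dom_mask_to_string_py mask caesura → Pre_mask_to_string_py mask caesura → Spec_mask_to_string_py mask caesura (mask_to_string_py mask caesura)

-- ===== LEMMAS AND PROOFS =====

-- common recursive characterisation of the inner helper (proof-side only)
def pvSpec : List Bool → Int → List Char
  | [], c => PySem.Int.toChars c
  | true :: t, _c => PySem.Int.toChars _c ++ '*' :: pvSpec t 0
  | false :: t, c => pvSpec t (c + 1)

theorem pvMsA_fold (seg : List Bool) (res : List Char) (c : Int) :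
    (seg.foldl pvStepA (res, c)).1 ++ PySem.Int.toChars (seg.foldl pvStepA (res, c)).2
    = res ++ pvSpec seg c := by
  induction seg generalizing res c with
  | nil => simp [pvSpec]
  | cons b t ih =>
    cases b with
    | true =>
      rw [List.foldl_cons, show pvStepA (res, c) true = (res ++ PySem.Int.toChars c ++ ['*'], 0) from rfl, ih]
      simp [pvSpec]
    | false =>
      rw [List.foldl_cons, show pvStepA (res, c) false = (res, c + 1) from rfl, ih]
      simp [pvSpec]

-- accent positions of `seg` when enumeration starts at s (proof-side view of B's comprehension)
def pvPos (seg : List Bool) (s : Int) : List Int :=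
  ((PySem.List.enumerate seg s).filter (fun p => p.2)).map (fun p => p.1)

theorem pvPos_nil (s : Int) : pvPos [] s = [] := by
  simp [pvPos, PySem.List.enumerate_nil]

theorem pvPos_true (t : List Bool) (s : Int) : pvPos (true :: t) s = s :: pvPos t (s + 1) := by
  simp [pvPos, PySem.List.enumerate_cons]

theorem pvPos_false (t : List Bool) (s : Int) : pvPos (false :: t) s = pvPos t (s + 1) := by
  simp [pvPos, PySem.List.enumerate_cons]

theorem pvB_general (seg : List Bool) (s a : Int) :
    PySem.Chars.join ['*']
      (((a :: (pvPos seg s).map (fun p => p + 1)).zip (pvPos seg s ++ [s + (seg.length : Int)])).map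
        (fun p => PySem.Int.toChars (p.2 - p.1))) = pvSpec seg (s - a) := by
  induction seg generalizing s a with
  | nil => simp [pvPos_nil, PySem.Chars.join_singleton, pvSpec]
  | cons b t ih =>
    cases b with
    | false =>
      have h := ih (s + 1) a
      have e : (s + 1) - a = (s - a) + 1 := by ring
      rw [e] at h
      have hlen : s + ((t.length : Int) + 1) = (s + 1) + (t.length : Int) := by ring
      simpa [pvPos_false, pvSpec, hlen] using h
    | true =>
      rcases ht : pvPos t (s + 1) ++ [(s + 1) + (t.length : Int)] with _ | ⟨y, ys⟩
      · simp at ht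
      · have h := ih (s + 1) (s + 1)
        rw [ht] at h
        have e : (s + 1) - (s + 1) = (0 : Int) := by ring
        rw [e] at h
        simp only [List.zip_cons_cons, List.map_cons] at h
        have hlen : s + ((t.length : Int) + 1) = (s + 1) + (t.length : Int) := by ring
        simp only [pvPos_true, List.map_cons, List.length_cons, Nat.cast_add, Nat.cast_one,
          List.cons_append, List.zip_cons_cons]
        rw [hlen, ht]
        simp only [List.zip_cons_cons, List.map_cons, PySem.Chars.join_cons_cons, pvSpec]
        rw [h]
        simp

theorem pvMsB_eq_spec (seg : List Bool) : pvMsB seg = pvSpec seg 0 := by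
  have h := pvB_general seg 0 0
  simp only [pvPos] at h
  simpa [pvMsB] using h

theorem pvMs_eq (seg : List Bool) : pvMsA seg = pvMsB seg := by
  rw [pvMsB_eq_spec]
  have h := pvMsA_fold seg [] 0
  simpa [pvMsA] using h

theorem pvSlice_len {α : Type} (xs : List α) (a : Int) :
    PySem.List.slice xs (some a) (some (xs.length : Int)) = PySem.List.slice xs (some a) none := by
  simp only [PySem.List.slice, PySem.List.clampIdx]
  split_ifs <;> simp <;> omega

-- ===== VERDICT (by name: the statement is the Claim_ definition above) =====
theorem mask_to_string_py_spec : Claim_equal_mask_to_string_py := by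
  intro mask caesura _ hPre
  unfold Spec_mask_to_string_py
  match caesura with
  | [] =>
      simp [mask_to_string_py, mask_to_string_py_alt, PySem.Chars.join_singleton,
        pvMs_eq]
  | [ca] =>
      simp [mask_to_string_py, mask_to_string_py_alt, PySem.Chars.join_cons_cons,
        PySem.Chars.join_singleton, PySem.List.slice_zero_start, pvSlice_len, pvMs_eq]
  | [ca, cb] =>
      simp [mask_to_string_py, mask_to_string_py_alt, PySem.Chars.join_cons_cons,
        PySem.Chars.join_singleton, PySem.List.slice_zero_start, pvSlice_len, pvMs_eq]
  | _ :: _ :: _ :: _ =>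
      exact absurd hPre (by simp [Pre_mask_to_string_py])
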